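-- pv_equiv track=rewrite | github.com/dg720/MultiConAD | processing/phase1/extract_features.py | dependency_depths_from_heads
-- ===== SOURCE A (Python) =====
-- def dependency_depths_from_heads(heads: dict[int, int]) -> list[int]:
--     depths = []
--     for node in heads:
--         seen = set()
--         current = node
--         depth = 0
--         while current in heads and heads[current] > 0 and current not in seen:
--             seen.add(current)
--             current = heads[current]
--             depth += 1
--         depths.append(depth)
--     return depths
-- ===== SOURCE B (Python) =====
-- def dependency_depths_from_heads(heads: dict[int, int]) -> list[int]:
--     # One DFS-style pass with memoisation over the functional graph:
--     # walk each unresolved chain once, then assign every node on the walked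
--     # path its depth in closed form (cycle nodes all get the cycle length).
--     memo: dict[int, int] = {}
--     for node in heads:
--         if node in memo:
--             continue
--         path = []
--         onpath = set()
--         cur = node
--         while cur not in memo and cur not in onpath:
--             h = heads.get(cur)
--             if h is None or h <= 0:
--                 memo[cur] = 0
--                 break
--             onpath.add(cur)
--             path.append(cur)
--             cur = h
--         n = len(path)
--         if cur in onpath and cur not in memo:
--             # the walk closed a cycle at cur = path[j]: nodes at or before j
--             # are n - i steps from the stop, nodes inside the cycle take n - j
--             # (= the cycle length) steps
--             j = path.index(cur)
--             for i, p in enumerate(path):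
--                 memo[p] = n - i if i <= j else n - j
--         else:
--             base = memo[cur]
--             for i, p in enumerate(path):
--                 memo[p] = n - i + base
--     return [memo[node] for node in heads]
-- ===== Notes on version B (the rewrite author's own statement) =====
-- stated objective: alternative
-- what changed: Instead of starting a fresh chain walk from every node, B walks each still-unresolved chain once and memoises a depth for every node on the walked path in closed form (distance to the stop, cycle nodes all getting the cycle length, memo hits adding the cached base), so no node's chain is ever re-walked.
import Mathlib
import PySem

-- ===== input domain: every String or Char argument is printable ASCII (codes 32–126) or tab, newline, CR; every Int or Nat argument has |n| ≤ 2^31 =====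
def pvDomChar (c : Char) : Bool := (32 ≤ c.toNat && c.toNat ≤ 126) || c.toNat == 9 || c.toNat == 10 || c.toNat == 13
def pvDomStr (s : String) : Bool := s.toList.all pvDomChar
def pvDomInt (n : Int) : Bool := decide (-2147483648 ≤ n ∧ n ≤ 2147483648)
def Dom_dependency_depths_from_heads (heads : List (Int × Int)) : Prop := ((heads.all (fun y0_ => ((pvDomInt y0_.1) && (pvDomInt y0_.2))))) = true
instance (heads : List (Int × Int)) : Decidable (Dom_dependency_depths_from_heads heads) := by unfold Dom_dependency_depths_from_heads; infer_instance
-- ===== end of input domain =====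

-- B replaces A's fresh chain walk per node by a single memoised DFS-style pass that
-- walks each unresolved chain once and assigns depths along it in closed form.

-- ===== PORT A =====
-- Termination helpers for A's while loop (cited in decreasing_by): the number of dict
-- keys not yet in the seen set strictly decreases at every iteration.
def pvKeysLeft (heads : List (Int × Int)) (seen : List Int) : Nat :=
  ((heads.map Prod.fst).filter (fun k => decide (k ∉ seen))).length

theorem pv_filter_dec {ks seen : List Int} {cur : Int}
    (hk : cur ∈ ks) (hs : cur ∉ seen) :
    (ks.filter (fun k => decide (k ∉ seen ++ [cur]))).length <
      (ks.filter (fun k => decide (k ∉ seen))).length := by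
  have hsplit : ks.filter (fun k => decide (k ∉ seen ++ [cur])) =
      (ks.filter (fun k => decide (k ∉ seen))).filter (fun k => decide (k ≠ cur)) := by
    rw [List.filter_filter]
    apply List.filter_congr
    intro x _
    by_cases h1 : x ∈ seen <;> by_cases h2 : x = cur <;> simp [h1, h2]
  rw [hsplit, List.length_filter_lt_length_iff_exists]
  exact ⟨cur, List.mem_filter.mpr ⟨hk, by simpa using hs⟩, by simp⟩

theorem pvKeysLeft_dec {heads : List (Int × Int)} {seen : List Int} {cur : Int}
    (hk : cur ∈ heads.map Prod.fst) (hs : cur ∉ seen) :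
    pvKeysLeft heads (seen ++ [cur]) < pvKeysLeft heads seen :=
  pv_filter_dec hk hs

theorem pv_mem_keys_of_get? {heads : List (Int × Int)} {cur : Int} {v : Int}
    (h : (PySem.Dict.mk heads).get? cur = some v) : cur ∈ heads.map Prod.fst := by
  induction heads with
  | nil => simp [PySem.Dict.get?] at h
  | cons p rest ih =>
    rw [show PySem.Dict.mk (p :: rest) = PySem.Dict.mk ((p.1, p.2) :: rest) by simp] at h
    rw [PySem.Dict.get?_mk_cons] at h
    by_cases he : p.1 = cur
    · simp [he]
    · simp [he] at h; simp [ih h]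

-- the inner while loop: walk the chain of heads from `current`, counting steps
def walkA (heads : List (Int × Int)) (seen : PySem.Set Int) (current : Int) (depth : Int) : Int :=
  match h : (PySem.Dict.mk heads).get? current with
  | some v =>
    if hc : v > 0 ∧ ¬ (PySem.Set.contains seen current) then
      walkA heads (PySem.Set.add seen current) v (depth + 1)
    else depth
  | none => depth
termination_by pvKeysLeft heads seen
decreasing_by
  have hns : current ∉ seen := by
    have := hc.2; simpa [PySem.Set.contains] using this
  rw [PySem.Set.add_of_not_mem hns]
  exact pvKeysLeft_dec (pv_mem_keys_of_get? h) hns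

def dependency_depths_from_heads (heads : List (Int × Int)) : List Int :=
  heads.foldl (fun depths p => depths ++ [walkA heads PySem.Set.empty p.1 0]) []

-- ===== PORT B =====
-- B's inner while loop: walk until a memoised node, a node already on the path
-- (a cycle), or a dead end (missing key / non-positive head, memoised as 0).
-- `steps` is a fuel bound making the recursion structural; bProcess supplies
-- heads.length + 1, which the proofs below show is never exhausted.
def bLoop (heads : List (Int × Int)) (steps : Nat) (memo : PySem.Dict Int Int)
    (onpath : PySem.Set Int) (trail : List Int) (cur : Int) :
    PySem.Dict Int Int × List Int × PySem.Set Int × Int :=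
  match steps with
  | 0 => (memo, trail, onpath, cur)
  | stepsLeft + 1 =>
    if memo.contains cur || PySem.Set.contains onpath cur then (memo, trail, onpath, cur)
    else
      match PySem.Dict.get? (PySem.Dict.mk heads) cur with
      | none => (memo.insert cur 0, trail, onpath, cur)
      | some hv =>
        if hv ≤ 0 then (memo.insert cur 0, trail, onpath, cur)
        else bLoop heads stepsLeft memo (PySem.Set.add onpath cur) (trail ++ [cur]) hv

-- one iteration of B's outer loop: resolve `node` and memoise the walked path
def bProcess (heads : List (Int × Int)) (memo : PySem.Dict Int Int) (node : Int) :
    PySem.Dict Int Int :=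
  if memo.contains node then memo
  else
    match bLoop heads (heads.length + 1) memo PySem.Set.empty [] node with
    | (memo1, path, onpath, cur) =>
      let n : Int := path.length
      if PySem.Set.contains onpath cur ∧ ¬ memo1.contains cur then
        let j : Int := ((PySem.List.index? path cur).getD 0 : Nat)
        (PySem.List.enumerate path).foldl
          (fun m ip => m.insert ip.2 (if ip.1 ≤ j then n - ip.1 else n - j)) memo1
      else
        let base := memo1.getD cur 0
        (PySem.List.enumerate path).foldl (fun m ip => m.insert ip.2 (n - ip.1 + base)) memo1

def dependency_depths_from_heads_alt (heads : List (Int × Int)) : List Int :=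
  let memo := heads.foldl (fun m p => bProcess heads m p.1) PySem.Dict.empty
  -- memo[node]: every key of heads is memoised (proved below), so getD's default is dead
  heads.map (fun kv => memo.getD kv.1 0)

-- ===== PRECONDITION & SPEC =====
def Spec_dependency_depths_from_heads (heads : List (Int × Int)) (out : List Int) : Prop := out = dependency_depths_from_heads_alt heads
instance (heads : List (Int × Int)) (out : List Int) : Decidable (Spec_dependency_depths_from_heads heads out) := by unfold Spec_dependency_depths_from_heads; infer_instance

-- ===== CLAIM (what is proved, stated in full; the proofs are below) =====
def Claim_equal_dependency_depths_from_heads : Prop := ∀ (heads : List (Int × Int)), Dom_dependency_depths_from_heads heads → Spec_dependency_depths_from_heads heads (dependency_depths_from_heads heads)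

-- ===== LEMMAS AND PROOFS =====

-- the one-step successor function of the walk: follow the head when present and positive
def pstep (heads : List (Int × Int)) (x : Int) : Option Int :=
  match (PySem.Dict.mk heads).get? x with
  | some v => if v > 0 then some v else none
  | none => none

theorem pv_mem_keys_of_pstep {heads : List (Int × Int)} {x y : Int}
    (h : pstep heads x = some y) : x ∈ heads.map Prod.fst := by
  unfold pstep at h
  cases hg : (PySem.Dict.mk heads).get? x with
  | none => rw [hg] at h; simp at h
  | some v => exact pv_mem_keys_of_get? hg

-- reference walk: trace of visited nodes and the final node
def prun (heads : List (Int × Int)) (seen : List Int) (cur : Int) : List Int × Int :=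
  match h : pstep heads cur with
  | some nxt =>
    if hs : cur ∈ seen then ([], cur)
    else
      let r := prun heads (seen ++ [cur]) nxt
      (cur :: r.1, r.2)
  | none => ([], cur)
termination_by pvKeysLeft heads seen
decreasing_by exact pvKeysLeft_dec (pv_mem_keys_of_pstep h) hs

def pdepth (heads : List (Int × Int)) (x : Int) : Int :=
  ((prun heads [] x).1.length : Int)

theorem prun_step_none {heads seen cur} (h : pstep heads cur = none) :
    prun heads seen cur = ([], cur) := by
  rw [prun.eq_def]; split <;> simp_all

theorem prun_step_mem {heads seen cur} (h : cur ∈ seen) :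
    prun heads seen cur = ([], cur) := by
  rw [prun.eq_def]; split <;> simp_all

theorem prun_step {heads seen cur nxt} (h : pstep heads cur = some nxt) (hs : cur ∉ seen) :
    prun heads seen cur =
      ((cur :: (prun heads (seen ++ [cur]) nxt).1), (prun heads (seen ++ [cur]) nxt).2) := by
  rw [prun.eq_def]; split <;> simp_all


-- the walk depends on `seen` only through membership
theorem prun_congr (heads : List (Int × Int)) :
    ∀ n s s' cur, pvKeysLeft heads s = n → (∀ z : Int, z ∈ s ↔ z ∈ s') →
      prun heads s cur = prun heads s' cur := by
  intro n
  induction n using Nat.strong_induction_on with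
  | _ n ih =>
    intro s s' cur hn hmem
    cases hstep : pstep heads cur with
    | none => rw [prun_step_none hstep, prun_step_none hstep]
    | some nxt =>
      by_cases hs : cur ∈ s
      · rw [prun_step_mem hs, prun_step_mem ((hmem cur).mp hs)]
      · have hs' : cur ∉ s' := fun hc => hs ((hmem cur).mpr hc)
        rw [prun_step hstep hs, prun_step hstep hs']
        have hdec := pvKeysLeft_dec (pv_mem_keys_of_pstep hstep) hs
        rw [ih _ (hn ▸ hdec) (s ++ [cur]) (s' ++ [cur]) nxt rfl
          (by intro z; simp [hmem z])]

-- extra seen elements never visited by the walk do not change it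
theorem prun_irrel (heads : List (Int × Int)) :
    ∀ n s extra cur, pvKeysLeft heads s = n →
      (∀ x ∈ extra, x ∉ (prun heads s cur).1) →
      prun heads (s ++ extra) cur = prun heads s cur := by
  intro n
  induction n using Nat.strong_induction_on with
  | _ n ih =>
    intro s extra cur hn hx
    cases hstep : pstep heads cur with
    | none => rw [prun_step_none hstep, prun_step_none hstep]
    | some nxt =>
      by_cases hs : cur ∈ s
      · rw [prun_step_mem hs, prun_step_mem (by simp [hs])]
      · rw [prun_step hstep hs] at hx ⊢
        have hcx : cur ∉ extra := by
          intro hc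
          exact hx cur hc (by simp)
        have hse : cur ∉ s ++ extra := by simp [hs, hcx]
        rw [prun_step hstep hse]
        have hdec := pvKeysLeft_dec (pv_mem_keys_of_pstep hstep) hs
        have hcongr : prun heads (s ++ extra ++ [cur]) nxt =
            prun heads (s ++ [cur] ++ extra) nxt := by
          apply prun_congr heads (pvKeysLeft heads (s ++ extra ++ [cur])) _ _ _ rfl
          intro z; simp; tauto
        rw [hcongr, ih _ (hn ▸ hdec) (s ++ [cur]) extra nxt rfl
          (by intro x hxe; have := hx x hxe; simp at this; tauto)]

-- q is a step-chain ending with a step to t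
def pIsChain (heads : List (Int × Int)) : List Int → Int → Prop
  | [], _ => True
  | x :: q, t => pstep heads x = some (q.headD t) ∧ pIsChain heads q t

theorem pchain_drop {heads : List (Int × Int)} {t : Int} :
    ∀ (i : Nat) (q : List Int), pIsChain heads q t → pIsChain heads (q.drop i) t := by
  intro i
  induction i with
  | zero => intro q h; simpa using h
  | succ i ih =>
    intro q h
    cases q with
    | nil => simp [pIsChain]
    | cons x q' => exact ih q' h.2

theorem pchain_take {heads : List (Int × Int)} {t : Int} :
    ∀ (k : Nat) (q : List Int) (hk : k < q.length), pIsChain heads q t →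
      pIsChain heads (q.take k) q[k] := by
  intro k
  induction k with
  | zero => intro q hk h; exact trivial
  | succ k ih =>
    intro q hk h
    cases q with
    | nil => simp at hk
    | cons x q' =>
      simp only [List.take_succ_cons, List.getElem_cons_succ]
      have hk' : k < q'.length := by simpa using hk
      refine ⟨?_, ih q' hk' h.2⟩
      have hx := h.1
      cases q' with
      | nil => simp at hk'
      | cons y rest =>
        cases k with
        | zero => simpa using hx
        | succ k => simpa using hx


-- unrolling the walk along a chain of fresh nodes
theorem prun_chain (heads : List (Int × Int)) :
    ∀ (q' : List Int) (x : Int) (seen : List Int) (t : Int),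
      pIsChain heads (x :: q') t → (x :: q').Nodup → (∀ z ∈ x :: q', z ∉ seen) →
      prun heads seen x =
        ((x :: q') ++ (prun heads (seen ++ (x :: q')) t).1,
          (prun heads (seen ++ (x :: q')) t).2) := by
  intro q'
  induction q' with
  | nil =>
    intro x seen t hchain hnd hdisj
    have hstep : pstep heads x = some t := by simpa using hchain.1
    rw [prun_step hstep (hdisj x (by simp))]
    simp
  | cons y rest ih =>
    intro x seen t hchain hnd hdisj
    have hstep : pstep heads x = some y := by simpa using hchain.1
    rw [prun_step hstep (hdisj x (by simp))]
    have hih := ih y (seen ++ [x]) t hchain.2 (List.Nodup.of_cons hnd)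
      (by
        intro z hz
        simp only [List.mem_append, List.mem_singleton]
        push Not
        refine ⟨hdisj z (by simp [hz]), ?_⟩
        intro hzx
        subst hzx
        exact (List.nodup_cons.mp hnd).1 hz)
    rw [hih]
    have harr : seen ++ [x] ++ y :: rest = seen ++ x :: y :: rest := by simp
    rw [harr]
    simp

-- A's loop counts exactly the nodes the reference walk visits
theorem walkA_eq_prun (heads : List (Int × Int)) :
    ∀ n (seen : List Int) cur d, pvKeysLeft heads seen = n →
      walkA heads seen cur d = d + ((prun heads seen cur).1.length : Int) := by
  intro n
  induction n using Nat.strong_induction_on with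
  | _ n ih =>
    intro seen cur d hn
    rw [walkA.eq_def]
    cases hg : (PySem.Dict.mk heads).get? cur with
    | none =>
      have hstep : pstep heads cur = none := by simp [pstep, hg]
      simp [prun_step_none hstep]
    | some v =>
      by_cases hv : v > 0
      · by_cases hs : cur ∈ seen
        · have hcont : PySem.Set.contains seen cur = true := by
            simp [PySem.Set.contains, hs]
          simp [prun_step_mem hs]
          intro _ hns
          exact absurd hs hns
        · have hstep : pstep heads cur = some v := by simp [pstep, hg, hv]
          have hcont : PySem.Set.contains seen cur = false := by
            simp [PySem.Set.contains, hs]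
          simp only [hcont, hv, true_and]
          rw [PySem.Set.add_of_not_mem hs]
          have hdec := pvKeysLeft_dec (pv_mem_keys_of_get? hg) hs
          rw [ih _ (hn ▸ hdec) (seen ++ [cur]) v (d + 1) rfl, prun_step hstep hs]
          simp
          omega
      · have hstep : pstep heads cur = none := by simp [pstep, hg, hv]
        simp [hv, prun_step_none hstep]

theorem walkA_empty_eq_pdepth (heads : List (Int × Int)) (x : Int) :
    walkA heads PySem.Set.empty x 0 = pdepth heads x := by
  have := walkA_eq_prun heads (pvKeysLeft heads []) [] x 0 rfl
  simpa [PySem.Set.empty, pdepth] using this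

-- a memo closed under the step function traps the walk: every visited node is memoised
def pClosed (heads : List (Int × Int)) (m : PySem.Dict Int Int) : Prop :=
  ∀ k y : Int, m.contains k = true → pstep heads k = some y → m.contains y = true

theorem prun_closed (heads : List (Int × Int)) {m : PySem.Dict Int Int} (hm : pClosed heads m) :
    ∀ n (seen : List Int) cur, pvKeysLeft heads seen = n → m.contains cur = true →
      ∀ z ∈ (prun heads seen cur).1, m.contains z = true := by
  intro n
  induction n using Nat.strong_induction_on with
  | _ n ih =>
    intro seen cur hn hcur z hz
    cases hstep : pstep heads cur with
    | none => rw [prun_step_none hstep] at hz; simp at hz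
    | some nxt =>
      by_cases hs : cur ∈ seen
      · rw [prun_step_mem hs] at hz; simp at hz
      · rw [prun_step hstep hs] at hz
        rcases List.mem_cons.mp hz with rfl | hz'
        · exact hcur
        · have hdec := pvKeysLeft_dec (pv_mem_keys_of_pstep hstep) hs
          exact ih _ (hn ▸ hdec) (seen ++ [cur]) nxt rfl (hm cur nxt hcur hstep) z hz'


-- depth of a node on the walked path, stop at a node whose own walk avoids the path
theorem pdepth_base (heads : List (Int × Int)) {p : List Int} {c : Int}
    (hchain : pIsChain heads p c) (hnd : p.Nodup)
    (hav : ∀ z ∈ (prun heads [] c).1, z ∉ p)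
    {i : Nat} (hi : i < p.length) :
    pdepth heads p[i] = (p.length : Int) - i + pdepth heads c := by
  have hdrop : p.drop i = p[i] :: (p.drop (i + 1)) := List.drop_eq_getElem_cons hi
  have h := prun_chain heads (p.drop (i + 1)) p[i] [] c
    (by rw [← hdrop]; exact pchain_drop i p hchain)
    (by rw [← hdrop]; exact hnd.sublist (List.drop_sublist i p))
    (by simp)
  rw [← hdrop] at h
  have hirr : prun heads ([] ++ p.drop i) c = prun heads [] c := by
    apply prun_irrel heads (pvKeysLeft heads []) [] (p.drop i) c rfl
    intro x hx hmem
    exact hav x hmem (List.mem_of_mem_drop hx)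
  unfold pdepth
  rw [h, hirr]
  simp [List.length_drop]
  omega

-- depth of a node on the walked path, stop closing a cycle at position j
theorem pdepth_cycle (heads : List (Int × Int)) {p : List Int} {j : Nat}
    (hj : j < p.length)
    (hchain : pIsChain heads p p[j]) (hnd : p.Nodup)
    {i : Nat} (hi : i < p.length) :
    pdepth heads p[i] =
      (if i ≤ j then (p.length : Int) - i else (p.length : Int) - j) := by
  have hdrop : p.drop i = p[i] :: (p.drop (i + 1)) := List.drop_eq_getElem_cons hi
  have h := prun_chain heads (p.drop (i + 1)) p[i] [] p[j]
    (by rw [← hdrop]; exact pchain_drop i p hchain)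
    (by rw [← hdrop]; exact hnd.sublist (List.drop_sublist i p))
    (by simp)
  rw [← hdrop] at h
  unfold pdepth
  rw [h]
  by_cases hij : i ≤ j
  · -- p[j] is among the seen nodes p.drop i: the walk stops at once
    have hjmem : p[j] ∈ [] ++ p.drop i := by
      simp only [List.nil_append]
      have : (p.drop i)[j - i]'(by simp [List.length_drop]; omega) = p[j] := by
        rw [List.getElem_drop]
        congr 1
        omega
      rw [← this]
      exact List.getElem_mem _
    rw [prun_step_mem hjmem]
    simp [List.length_drop, hij]
    omega
  · -- the walk continues around the cycle p[j] … p[i-1] and stops at p[i]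
    push Not at hij
    have hq2len : i - j < (List.drop j p).length := by simp [List.length_drop]; omega
    have hq2chain : pIsChain heads (List.take (i - j) (List.drop j p)) p[i] := by
      have h2 := pchain_take (i - j) (List.drop j p) hq2len (pchain_drop j p hchain)
      have hgj : (List.drop j p)[i - j] = p[i] := by
        rw [List.getElem_drop]
        congr 1
        omega
      rwa [hgj] at h2
    obtain ⟨tl, hq2eq⟩ : ∃ tl, List.take (i - j) (List.drop j p) = p[j] :: tl := by
      obtain ⟨k, hk⟩ : ∃ k, i - j = k + 1 := ⟨i - j - 1, by omega⟩
      rw [hk, List.drop_eq_getElem_cons hj, List.take_succ_cons]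
      exact ⟨_, rfl⟩
    have hnd2 : (List.take (i - j) (List.drop j p)).Nodup :=
      (hnd.sublist (List.drop_sublist j p)).sublist (List.take_sublist _ _)
    have hdisj2 : ∀ z ∈ List.take (i - j) (List.drop j p), z ∉ [] ++ List.drop i p := by
      have hsplit : List.take (i - j) (List.drop j p) ++ List.drop i p = List.drop j p := by
        have : List.drop (i - j) (List.drop j p) = List.drop i p := by
          rw [List.drop_drop]
          congr 1
          omega
        rw [← this, List.take_append_drop]
      have hndj : (List.take (i - j) (List.drop j p) ++ List.drop i p).Nodup := by
        rw [hsplit]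
        exact hnd.sublist (List.drop_sublist j p)
      intro z hz
      simp only [List.nil_append]
      exact fun hcontra => (List.nodup_append.mp hndj).2.2 z hz z hcontra rfl
    have h2 := prun_chain heads tl p[j] ([] ++ List.drop i p) p[i]
      (hq2eq ▸ hq2chain) (hq2eq ▸ hnd2) (hq2eq ▸ hdisj2)
    rw [h2]
    have hifin : p[i] ∈ [] ++ List.drop i p ++ p[j] :: tl := by
      simp only [List.nil_append, List.mem_append]
      exact Or.inl (by rw [hdrop]; exact List.mem_cons_self ..)
    rw [prun_step_mem hifin]
    have hlen2 : (p[j] :: tl).length = i - j := by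
      rw [← hq2eq]
      simp [List.length_take, List.length_drop]
      omega
    simp only [List.length_append, List.length_drop, hlen2, List.length_nil] at *
    simp [hij.le, Nat.not_le.mpr hij]
    omega

theorem pchain_snoc {heads : List (Int × Int)} :
    ∀ (path : List Int) {cur v : Int}, pIsChain heads path cur →
      pstep heads cur = some v → pIsChain heads (path ++ [cur]) v := by
  intro path
  induction path with
  | nil =>
    intro cur v _ hstep
    exact ⟨by simpa using hstep, trivial⟩
  | cons x rest ih =>
    intro cur v hchain hstep
    refine ⟨?_, ih hchain.2 hstep⟩
    have hx := hchain.1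
    cases rest with
    | nil => simpa using hx
    | cons y r2 => simpa using hx

theorem pchain_getElem {heads : List (Int × Int)} {p : List Int} {t : Int}
    (h : pIsChain heads p t) {i : Nat} (hi : i < p.length) :
    pstep heads p[i] = some (if h2 : i + 1 < p.length then p[i + 1] else t) := by
  have hd := pchain_drop i p h
  rw [List.drop_eq_getElem_cons hi] at hd
  have := hd.1
  by_cases h2 : i + 1 < p.length
  · rw [List.drop_eq_getElem_cons h2] at this
    simpa [h2] using this
  · have : pstep heads p[i] = some ((List.drop (i+1) p).headD t) := this
    rw [List.drop_eq_nil_of_le (by omega)] at this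
    simpa [h2] using this

-- effect of the depth-assignment loop `for i, p in enumerate(path): memo[p] = f(i)`
theorem foldl_enum_insert_contains (f : Int → Int) :
    ∀ (path : List Int) (s : Int) (m : PySem.Dict Int Int) (z : Int),
      ((PySem.List.enumerate path s).foldl
        (fun m ip => m.insert ip.2 (f ip.1)) m).contains z =
      (decide (z ∈ path) || m.contains z) := by
  intro path
  induction path with
  | nil => intro s m z; simp [PySem.List.enumerate_nil]
  | cons x rest ih =>
    intro s m z
    rw [PySem.List.enumerate_cons, List.foldl_cons, ih]
    by_cases hz : z = x
    · subst hz
      simp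
    · simp only [PySem.Dict.contains_insert, show (z == x) = false by simp [hz],
        Bool.false_or]
      simp [hz]

theorem foldl_enum_insert_getD_notmem (f : Int → Int) :
    ∀ (path : List Int) (s : Int) (m : PySem.Dict Int Int) (z : Int), z ∉ path →
      ((PySem.List.enumerate path s).foldl
        (fun m ip => m.insert ip.2 (f ip.1)) m).getD z 0 = m.getD z 0 := by
  intro path
  induction path with
  | nil => intro s m z _; simp [PySem.List.enumerate_nil]
  | cons x rest ih =>
    intro s m z hz
    rw [PySem.List.enumerate_cons, List.foldl_cons,
      ih (s+1) _ z (by simp at hz; tauto)]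
    exact PySem.Dict.getD_insert_of_ne _ _ _ (by simp at hz; tauto)

theorem foldl_enum_insert_getD (f : Int → Int) :
    ∀ (path : List Int) (s : Int) (m : PySem.Dict Int Int), path.Nodup →
      ∀ (i : Nat) (hi : i < path.length),
      ((PySem.List.enumerate path s).foldl
        (fun m ip => m.insert ip.2 (f ip.1)) m).getD path[i] 0 = f (s + i) := by
  intro path
  induction path with
  | nil => intro s m _ i hi; simp at hi
  | cons x rest ih =>
    intro s m hnd i hi
    rw [PySem.List.enumerate_cons, List.foldl_cons]
    cases i with
    | zero =>
      simp only [List.getElem_cons_zero]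
      rw [foldl_enum_insert_getD_notmem f rest (s+1) _ x (List.nodup_cons.mp hnd).1]
      rw [PySem.Dict.getD_insert_self]
      norm_num
    | succ i =>
      simp only [List.getElem_cons_succ]
      rw [ih (s+1) _ (List.nodup_cons.mp hnd).2 i (by simpa using hi)]
      congr 1
      push_cast
      ring

-- what B's inner loop returns: the walked path, the stop node, and how it stopped
theorem bLoop_spec (heads : List (Int × Int)) :
    ∀ (fuel : Nat) (m : PySem.Dict Int Int) (path : List Int) (cur : Int),
      pvKeysLeft heads path < fuel →
      path.Nodup → pIsChain heads path cur →
      (∀ z ∈ path, m.contains z = false) →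
      ∃ (p : List Int) (c' : Int) (m1 : PySem.Dict Int Int),
        bLoop heads fuel m path path cur = (m1, p, p, c') ∧
        p.Nodup ∧ pIsChain heads p c' ∧ (∀ z ∈ p, m1.contains z = false) ∧
        path <+: p ∧ (cur ∈ p ∨ (p = path ∧ c' = cur)) ∧
        ((c' ∈ p ∧ m1 = m ∧ m1.contains c' = false) ∨
         (m1.contains c' = true ∧
          (m1 = m ∨ (m1 = m.insert c' 0 ∧ pstep heads c' = none ∧ m.contains c' = false)))) := by
  intro fuel
  induction fuel with
  | zero => intro m path cur hfu; omega
  | succ fuel ih =>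
    intro m path cur hfu hnd hchain hdisj
    rw [bLoop]
    by_cases hc1 : m.contains cur = true
    · -- stop: memoised node
      rw [if_pos (by simp [hc1])]
      exact ⟨path, cur, m, rfl, hnd, hchain, hdisj, List.prefix_refl _,
        Or.inr ⟨rfl, rfl⟩, Or.inr ⟨hc1, Or.inl rfl⟩⟩
    · by_cases hc2 : cur ∈ path
      · -- stop: cycle closed
        rw [if_pos (by simp [PySem.Set.contains, hc1, hc2])]
        exact ⟨path, cur, m, rfl, hnd, hchain, hdisj, List.prefix_refl _,
          Or.inr ⟨rfl, rfl⟩, Or.inl ⟨hc2, rfl, by simpa using hc1⟩⟩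
      · rw [if_neg (by simp [PySem.Set.contains, hc1, hc2])]
        cases hg : PySem.Dict.get? (PySem.Dict.mk heads) cur with
        | none =>
          -- stop: dead end (no head), memoise 0
          have hstep : pstep heads cur = none := by simp [pstep, hg]
          refine ⟨path, cur, m.insert cur 0, by simp, hnd, hchain, ?_,
            List.prefix_refl _, Or.inr ⟨rfl, rfl⟩,
            Or.inr ⟨by simp, Or.inr ⟨rfl, hstep, by simpa using hc1⟩⟩⟩
          intro z hz
          have hzc : z ≠ cur := fun h => hc2 (h ▸ hz)
          simp [PySem.Dict.contains_insert, hzc, hdisj z hz]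
        | some v =>
          by_cases hv : v ≤ 0
          · -- stop: dead end (non-positive head), memoise 0
            have hstep : pstep heads cur = none := by
              simp [pstep, hg]
              omega
            refine ⟨path, cur, m.insert cur 0, by simp [hv], hnd, hchain, ?_,
              List.prefix_refl _, Or.inr ⟨rfl, rfl⟩,
              Or.inr ⟨by simp, Or.inr ⟨rfl, hstep, by simpa using hc1⟩⟩⟩
            intro z hz
            have hzc : z ≠ cur := fun h => hc2 (h ▸ hz)
            simp [PySem.Dict.contains_insert, hzc, hdisj z hz]
          · -- walk on
            have hstep : pstep heads cur = some v := by
              simp [pstep, hg]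
              omega
            have hdec := pvKeysLeft_dec (pv_mem_keys_of_pstep hstep) hc2
            have hsnoc := pchain_snoc path hchain hstep
            obtain ⟨p, c', m1, heq, hpnd, hpch, hpdis, hppre, hpcur, hpcase⟩ :=
              ih m (path ++ [cur]) v (by omega)
              (by
                simp [List.nodup_append, hnd]
                exact fun a ha h => hc2 (h ▸ ha))
              hsnoc
              (by
                intro z hz
                rcases List.mem_append.mp hz with hz1 | hz2
                · exact hdisj z hz1
                · simpa [List.mem_singleton.mp hz2] using hc1)
            refine ⟨p, c', m1, ?_, hpnd, hpch, hpdis,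
              (List.prefix_append path [cur]).trans hppre,
              Or.inl (hppre.subset (by simp)), hpcase⟩
            simpa [hv, show PySem.Set.add path cur = path ++ [cur] from
              PySem.Set.add_of_not_mem hc2] using heq

-- the memo invariant: step-closed, and every memoised value is the true walk depth
def pGood (heads : List (Int × Int)) (m : PySem.Dict Int Int) : Prop :=
  pClosed heads m ∧ ∀ k : Int, m.contains k = true → m.getD k 0 = pdepth heads k

theorem pGood_m1 {heads : List (Int × Int)} {m m1 : PySem.Dict Int Int} {c' : Int}
    (hm : pGood heads m)
    (hcase : m1 = m ∨ (m1 = m.insert c' 0 ∧ pstep heads c' = none ∧ m.contains c' = false)) :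
    pGood heads m1 ∧ (∀ k : Int, m.contains k = true → m1.contains k = true) := by
  rcases hcase with rfl | ⟨rfl, hstep, hnc⟩
  · exact ⟨hm, fun k hk => hk⟩
  · refine ⟨⟨?_, ?_⟩, ?_⟩
    · intro k y hk hs
      rw [PySem.Dict.contains_insert] at hk ⊢
      by_cases hkc : k = c'
      · subst hkc
        rw [hstep] at hs
        cases hs
      · simp only [show (k == c') = false by simp [hkc], Bool.false_or] at hk
        simp [hm.1 k y hk hs]
    · intro k hk
      by_cases hkc : k = c'
      · subst hkc
        rw [PySem.Dict.getD_insert_self]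
        unfold pdepth
        rw [prun_step_none hstep]
        simp
      · rw [PySem.Dict.contains_insert,
          show (k == c') = false by simp [hkc], Bool.false_or] at hk
        rw [PySem.Dict.getD_insert_of_ne _ _ _ hkc]
        exact hm.2 k hk
    · intro k hk
      rw [PySem.Dict.contains_insert, hk]
      simp

theorem pGood_assign (heads : List (Int × Int)) (m1 : PySem.Dict Int Int)
    (p : List Int) (f : Int → Int)
    (hm1 : pGood heads m1) (hpnd : p.Nodup)
    (hpdis : ∀ z ∈ p, m1.contains z = false)
    (hval : ∀ (i : Nat), i < p.length → ∀ (hi : i < p.length), f i = pdepth heads p[i])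
    (hcl : ∀ (i : Nat) (hi : i < p.length) (y : Int), pstep heads p[i] = some y →
             y ∈ p ∨ m1.contains y = true) :
    pGood heads ((PySem.List.enumerate p).foldl
        (fun m ip => m.insert ip.2 (f ip.1)) m1) ∧
      ∀ z : Int, ((PySem.List.enumerate p).foldl
        (fun m ip => m.insert ip.2 (f ip.1)) m1).contains z =
          (decide (z ∈ p) || m1.contains z) := by
  have hcont := fun z => foldl_enum_insert_contains f p 0 m1 z
  refine ⟨⟨?_, ?_⟩, hcont⟩
  · -- closed
    intro k y hk hs
    rw [hcont k] at hk
    rw [hcont y]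
    rcases Bool.or_eq_true_iff.mp hk with hk1 | hk2
    · obtain ⟨i, hi, rfl⟩ := List.mem_iff_getElem.mp (of_decide_eq_true hk1)
      rcases hcl i hi y hs with hy | hy
      · simp [hy]
      · simp [hy]
    · have := hm1.1 k y hk2 hs
      simp [this]
  · -- values
    intro k hk
    rw [hcont k] at hk
    by_cases hkp : k ∈ p
    · obtain ⟨i, hi, rfl⟩ := List.mem_iff_getElem.mp hkp
      rw [foldl_enum_insert_getD f p 0 m1 hpnd i hi, ← hval i hi hi]
      norm_num
    · rw [foldl_enum_insert_getD_notmem f p 0 m1 k hkp]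
      rcases Bool.or_eq_true_iff.mp hk with hk1 | hk2
      · exact absurd (of_decide_eq_true hk1) hkp
      · exact hm1.2 k hk2

theorem pvKeysLeft_nil_lt (heads : List (Int × Int)) :
    pvKeysLeft heads [] < heads.length + 1 := by
  unfold pvKeysLeft
  calc ((heads.map Prod.fst).filter _).length ≤ (heads.map Prod.fst).length :=
        List.length_filter_le _ _
    _ = heads.length := List.length_map ..
    _ < heads.length + 1 := Nat.lt_succ_self _

theorem bProcess_spec (heads : List (Int × Int)) (m : PySem.Dict Int Int) (node : Int)
    (hm : pGood heads m) :
    pGood heads (bProcess heads m node) ∧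
    (bProcess heads m node).contains node = true ∧
    (∀ k : Int, m.contains k = true → (bProcess heads m node).contains k = true) := by
  unfold bProcess
  by_cases hcn : m.contains node = true
  · rw [if_pos hcn]
    exact ⟨hm, hcn, fun k hk => hk⟩
  · rw [if_neg hcn]
    obtain ⟨p, c', m1, heq, hpnd, hpch, hpdis, hppre, hpcur, hpcase⟩ :=
      bLoop_spec heads (heads.length + 1) m [] node (pvKeysLeft_nil_lt heads)
        (by simp) trivial (by simp)
    rw [show (PySem.Set.empty : PySem.Set Int) = ([] : List Int) from rfl, heq]
    dsimp only
    rcases hpcase with ⟨hcp, hm1m, hcnot⟩ | ⟨hcyes, hm1case⟩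
    · -- cycle case
      rw [if_pos ⟨by simp [PySem.Set.contains, hcp], by simp [hcnot]⟩]
      obtain ⟨jN, hjsome⟩ : ∃ jN, PySem.List.index? p c' = some jN :=
        Option.isSome_iff_exists.mp ((PySem.List.index?_isSome_iff p c').mpr hcp)
      obtain ⟨hjlt, hjget, _⟩ := PySem.List.getElem_of_index?_eq_some hjsome
      rw [hjsome]
      simp only [Option.getD_some]
      have hch' : pIsChain heads p p[jN] := by rw [hjget]; exact hpch
      have has := pGood_assign heads m1 p
        (fun i => if i ≤ (jN : Int) then (p.length : Int) - i else (p.length : Int) - jN)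
        (hm1m ▸ hm) hpnd hpdis
        (by
          intro i _ hi
          rw [pdepth_cycle heads hjlt hch' hpnd hi]
          show (if ((i : Nat) : Int) ≤ ((jN : Nat) : Int) then _ else _) = _
          by_cases hij : i ≤ jN
          · rw [if_pos (show ((i : Nat) : Int) ≤ ((jN : Nat) : Int) by exact_mod_cast hij),
              if_pos hij]
          · rw [if_neg (show ¬ (((i : Nat) : Int) ≤ ((jN : Nat) : Int)) by exact_mod_cast hij),
              if_neg hij])
        (by
          intro i hi y hs
          rw [pchain_getElem hpch hi] at hs
          have hy := (Option.some.inj hs).symm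
          by_cases h2 : i + 1 < p.length
          · simp only [h2, dite_true] at hy
            exact Or.inl (hy ▸ List.getElem_mem _)
          · simp only [h2, dite_false] at hy
            exact Or.inl (hy ▸ hcp))
      refine ⟨has.1, ?_, ?_⟩
      · rcases hpcur with hnode | ⟨hp0, _⟩
        · rw [has.2 node]
          simp [hnode]
        · rw [hp0] at hcp
          cases hcp
      · intro k hk
        rw [has.2 k, hm1m, hk]
        simp
    · -- base case (memo hit or dead end)
      rw [if_neg (fun hcontra => hcontra.2 hcyes)]
      obtain ⟨hg1, hgmono⟩ := pGood_m1 hm hm1case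
      have hbase : m1.getD c' 0 = pdepth heads c' := hg1.2 c' hcyes
      have hav : ∀ z ∈ (prun heads [] c').1, z ∉ p := by
        intro z hz hzp
        have hzc := prun_closed heads hg1.1 (pvKeysLeft heads []) [] c' rfl hcyes z hz
        rw [hpdis z hzp] at hzc
        cases hzc
      have has := pGood_assign heads m1 p
        (fun i => (p.length : Int) - i + m1.getD c' 0) hg1 hpnd hpdis
        (by
          intro i _ hi
          rw [hbase, pdepth_base heads hpch hpnd hav hi])
        (by
          intro i hi y hs
          rw [pchain_getElem hpch hi] at hs
          have hy := (Option.some.inj hs).symm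
          by_cases h2 : i + 1 < p.length
          · simp only [h2, dite_true] at hy
            exact Or.inl (hy ▸ List.getElem_mem _)
          · simp only [h2, dite_false] at hy
            exact Or.inr (hy ▸ hcyes))
      refine ⟨has.1, ?_, ?_⟩
      · rcases hpcur with hnode | ⟨_, hc0⟩
        · rw [has.2 node]
          simp [hnode]
        · rw [has.2 node, ← hc0]
          simp [hcyes]
      · intro k hk
        rw [has.2 k]
        simp [hgmono k hk]

theorem bFold_spec (heads : List (Int × Int)) :
    ∀ (l : List (Int × Int)) (m : PySem.Dict Int Int), pGood heads m →
      pGood heads (l.foldl (fun m p => bProcess heads m p.1) m) ∧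
      (∀ k : Int, m.contains k = true →
        (l.foldl (fun m p => bProcess heads m p.1) m).contains k = true) ∧
      (∀ x ∈ l, (l.foldl (fun m p => bProcess heads m p.1) m).contains x.1 = true) := by
  intro l
  induction l with
  | nil => intro m hm; exact ⟨hm, fun k hk => hk, by simp⟩
  | cons x rest ih =>
    intro m hm
    rw [List.foldl_cons]
    obtain ⟨h1, h2, h3⟩ := bProcess_spec heads m x.1 hm
    obtain ⟨g1, g2, g3⟩ := ih (bProcess heads m x.1) h1
    refine ⟨g1, fun k hk => g2 k (h3 k hk), ?_⟩
    intro y hy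
    rcases List.mem_cons.mp hy with rfl | hy'
    · exact g2 y.1 h2
    · exact g3 y hy'

theorem pGood_empty (heads : List (Int × Int)) : pGood heads PySem.Dict.empty := by
  constructor
  · intro k y hk
    rw [PySem.Dict.contains_empty] at hk
    cases hk
  · intro k hk
    rw [PySem.Dict.contains_empty] at hk
    cases hk

-- ===== VERDICT (by name: the statement is the Claim_ definition above) =====
theorem dependency_depths_from_heads_spec : Claim_equal_dependency_depths_from_heads := by
  intro heads _
  unfold Spec_dependency_depths_from_heads
  unfold dependency_depths_from_heads dependency_depths_from_heads_alt
  obtain ⟨hg, _, hall⟩ :=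
    bFold_spec heads heads PySem.Dict.empty (pGood_empty heads)
  rw [PySem.List.foldl_append_singleton_eq_map]
  simp only [List.nil_append]
  apply List.map_congr_left
  intro x hx
  rw [walkA_empty_eq_pdepth]
  exact (hg.2 x.1 (hall x hx)).symm
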